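-- pv_equiv track=rewrite | github.com/omogr/omogre | omogre/transcriptor/transcriptor.py | get_g2p_without_accent
-- ===== SOURCE A (Python) =====
-- def get_g2p_without_accent(grapheme_to_phoneme_vocab):
--     grapheme_phoneme = {}
--     grapheme_freq = {}
--     for grapheme_with_accent, phoneme_vars in grapheme_to_phoneme_vocab.items():
--         grapheme = grapheme_with_accent.replace('+', '')
--         for phoneme, freq in phoneme_vars.items():
--             if (grapheme_freq.get(grapheme, 0) < freq):
--                 grapheme_phoneme[grapheme] = phoneme
--                 grapheme_freq[grapheme] = freq
--     return grapheme_phoneme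
-- ===== SOURCE B (Python) =====
-- def get_g2p_without_accent(grapheme_to_phoneme_vocab):
--     # Collect, per accent-stripped grapheme, every observed (phoneme, frequency)
--     # pair; a variant with a non-positive count was never observed, so it is
--     # dropped at ingestion.
--     observed = {}
--     for grapheme_with_accent, phoneme_vars in grapheme_to_phoneme_vocab.items():
--         grapheme = grapheme_with_accent.replace('+', '')
--         for phoneme, freq in phoneme_vars.items():
--             if freq > 0:
--                 observed.setdefault(grapheme, []).append((phoneme, freq))
--     # Most frequent phoneme per grapheme; max keeps the earliest on ties.
--     return {g: max(pairs, key=lambda pf: pf[1])[0]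
--             for g, pairs in observed.items()}
-- ===== Notes on version B (the rewrite author's own statement) =====
-- stated objective: alternative
-- what changed: A's single fused running-max scan over two parallel dicts is replaced by a two-phase pipeline: group the observed (positive-count) phoneme variants per stripped grapheme with setdefault/append, then reduce each group with max (earliest wins ties).
import Mathlib
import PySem

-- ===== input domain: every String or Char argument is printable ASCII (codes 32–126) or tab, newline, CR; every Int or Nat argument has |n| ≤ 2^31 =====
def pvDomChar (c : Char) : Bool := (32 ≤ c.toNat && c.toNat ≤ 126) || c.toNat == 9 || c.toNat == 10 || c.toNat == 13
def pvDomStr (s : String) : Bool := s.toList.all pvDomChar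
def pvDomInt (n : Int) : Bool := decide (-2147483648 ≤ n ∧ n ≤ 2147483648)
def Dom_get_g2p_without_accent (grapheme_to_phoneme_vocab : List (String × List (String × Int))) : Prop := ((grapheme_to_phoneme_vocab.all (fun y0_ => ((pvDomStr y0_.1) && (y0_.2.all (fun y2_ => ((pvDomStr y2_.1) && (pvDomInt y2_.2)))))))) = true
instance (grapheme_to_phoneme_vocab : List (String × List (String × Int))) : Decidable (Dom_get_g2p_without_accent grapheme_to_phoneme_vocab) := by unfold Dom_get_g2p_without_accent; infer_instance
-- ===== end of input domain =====

-- B replaces A's fused running-max scan over two parallel dicts by a two-phase pipeline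
-- (group the observed positive-count variants per stripped grapheme, then reduce each
-- group with max, earliest wins ties); same cost, different decomposition.


-- ===== PORT A =====
def get_g2p_without_accent (grapheme_to_phoneme_vocab : List (String × List (String × Int))) : List (String × String) :=
  ((grapheme_to_phoneme_vocab.foldl
      (fun (st : PySem.Dict String String × PySem.Dict String Int) p =>
        let grapheme := PySem.Str.replace p.1 "+" ""
        p.2.foldl
          (fun st q =>
            if st.2.getD grapheme 0 < q.2 then
              (st.1.insert grapheme q.1, st.2.insert grapheme q.2)
            else st)
          st)
      (PySem.Dict.empty, PySem.Dict.empty)).1).items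

-- ===== PORT B =====
def get_g2p_without_accent_alt (grapheme_to_phoneme_vocab : List (String × List (String × Int))) : List (String × String) :=
  let observed := grapheme_to_phoneme_vocab.foldl
    (fun (d : PySem.Dict String (List (String × Int))) p =>
      let grapheme := PySem.Str.replace p.1 "+" ""
      p.2.foldl (fun d q => if 0 < q.2 then d.modify grapheme [] (· ++ [q]) else d) d)
    PySem.Dict.empty
  -- Python's max never raises here: every list in 'observed' is nonempty (it is
  -- created by the first append), so the '.getD ""' default is never consulted.
  (observed.items.foldl
    (fun (r : PySem.Dict String String) kv =>
      r.insert kv.1 (((PySem.List.max? kv.2 (fun pf => pf.2)).map (fun pf => pf.1)).getD ""))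
    PySem.Dict.empty).items

-- ===== PRECONDITION & SPEC =====
def Spec_get_g2p_without_accent (grapheme_to_phoneme_vocab : List (String × List (String × Int))) (out : List (String × String)) : Prop := out = get_g2p_without_accent_alt grapheme_to_phoneme_vocab
instance (grapheme_to_phoneme_vocab : List (String × List (String × Int))) (out : List (String × String)) : Decidable (Spec_get_g2p_without_accent grapheme_to_phoneme_vocab out) := by unfold Spec_get_g2p_without_accent; infer_instance

-- ===== CLAIM (what is proved, stated in full; the proofs are below) =====
def Claim_equal_get_g2p_without_accent : Prop := ∀ (grapheme_to_phoneme_vocab : List (String × List (String × Int))), Dom_get_g2p_without_accent grapheme_to_phoneme_vocab → Spec_get_g2p_without_accent grapheme_to_phoneme_vocab (get_g2p_without_accent grapheme_to_phoneme_vocab)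

-- ===== LEMMAS AND PROOFS =====

-- A's per-iteration state update over one flattened (grapheme, phoneme, freq) triple.
def pvStep (st : PySem.Dict String String × PySem.Dict String Int) (t : String × String × Int) :
    PySem.Dict String String × PySem.Dict String Int :=
  if st.2.getD t.1 0 < t.2.2 then (st.1.insert t.1 t.2.1, st.2.insert t.1 t.2.2) else st

-- running max over (phoneme, freq) pairs, strict '<' so the earliest max wins
def pvRun (c : String × Int) (ps : List (String × Int)) : String × Int :=
  ps.foldl (fun c pf => if c.2 < pf.2 then pf else c) c

-- all (phoneme, freq) pairs of grapheme g, in input order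
def pvPairs (ts : List (String × String × Int)) (g : String) : List (String × Int) :=
  (ts.filter (fun t => t.1 == g)).map (fun t => t.2)

-- graphemes in order of their first positive-frequency triple, skipping 'seen'
def pvNews : List (String × String × Int) → List String → List String
  | [], _ => []
  | t :: rest, seen =>
      if 0 < t.2.2 && !(seen.contains t.1) then t.1 :: pvNews rest (t.1 :: seen)
      else pvNews rest seen

lemma pvNews_congr (ts : List (String × String × Int)) :
    ∀ s s' : List String, (∀ x, s.contains x = s'.contains x) → pvNews ts s = pvNews ts s' := by
  induction ts with
  | nil => intro s s' h; rfl
  | cons t rest ih =>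
      intro s s' h
      simp only [pvNews, h t.1]
      split
      · refine congrArg _ (ih _ _ ?_)
        intro x
        simp only [List.contains_cons, h x]
      · exact ih _ _ h

lemma pvNews_mem_pos (ts : List (String × String × Int)) :
    ∀ s g, g ∈ pvNews ts s → ∃ t ∈ ts, t.1 = g ∧ 0 < t.2.2 := by
  induction ts with
  | nil => intro s g h; simp [pvNews] at h
  | cons t rest ih =>
      intro s g h
      simp only [pvNews] at h
      by_cases hcond : (decide (0 < t.2.2) && !(s.contains t.1)) = true
      · rw [if_pos hcond] at h
        have hpos : 0 < t.2.2 := by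
          have := ((Bool.and_eq_true _ _).mp hcond).1
          simpa using this
        rcases List.mem_cons.mp h with rfl | h'
        · exact ⟨t, List.mem_cons_self, rfl, hpos⟩
        · obtain ⟨t', ht', e1, e2⟩ := ih _ _ h'
          exact ⟨t', List.mem_cons_of_mem _ ht', e1, e2⟩
      · rw [if_neg hcond] at h
        obtain ⟨t', ht', e1, e2⟩ := ih _ _ h
        exact ⟨t', List.mem_cons_of_mem _ ht', e1, e2⟩

lemma pvNews_mem_not_seen (ts : List (String × String × Int)) :
    ∀ s g, g ∈ pvNews ts s → s.contains g = false := by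
  induction ts with
  | nil => intro s g h; simp [pvNews] at h
  | cons t rest ih =>
      intro s g h
      simp only [pvNews] at h
      by_cases hcond : (decide (0 < t.2.2) && !(s.contains t.1)) = true
      · rw [if_pos hcond] at h
        have hns : s.contains t.1 = false := by
          have := ((Bool.and_eq_true _ _).mp hcond).2
          simpa using this
        rcases List.mem_cons.mp h with rfl | h'
        · exact hns
        · have := ih _ _ h'
          simp only [List.contains_cons, Bool.or_eq_false_iff] at this
          exact this.2
      · rw [if_neg hcond] at h
        exact ih _ _ h

lemma foldl_add_eq_pvNews (ts : List (String × String × Int)) :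
    ∀ s : List String,
      List.foldl PySem.Set.add s ((ts.filter (fun t => 0 < t.2.2)).map (fun t => t.1))
        = s ++ pvNews ts s := by
  induction ts with
  | nil => intro s; simp [pvNews]
  | cons t rest ih =>
      intro s
      by_cases hf : (0 : Int) < t.2.2
      · have hd : decide (0 < t.2.2) = true := by simpa using hf
        rw [List.filter_cons, if_pos hd, List.map_cons, List.foldl_cons]
        by_cases hs : s.contains t.1 = true
        · have hm : t.1 ∈ s := by simpa using hs
          have hadd : PySem.Set.add s t.1 = s := by
            simp [PySem.Set.add, PySem.Set.contains, hm]
          rw [hadd, ih s]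
          simp [pvNews, hf, hm]
        · have hm : t.1 ∉ s := by simpa using hs
          have hadd : PySem.Set.add s t.1 = s ++ [t.1] := by
            simp [PySem.Set.add, PySem.Set.contains, hm]
          rw [hadd, ih (s ++ [t.1])]
          have hcg : pvNews rest (s ++ [t.1]) = pvNews rest (t.1 :: s) := by
            apply pvNews_congr
            intro x
            simp [Bool.or_comm]
          rw [hcg]
          simp [pvNews, hf, hm]
      · have hd : ¬ (decide (0 < t.2.2) = true) := by simpa using hf
        rw [List.filter_cons, if_neg hd]
        rw [ih s]
        simp [pvNews, hf]

lemma pvRun_cons (c p : String × Int) (ps : List (String × Int)) :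
    pvRun c (p :: ps) = pvRun (if c.2 < p.2 then p else c) ps := by
  simp [pvRun]

lemma max?_eq_pvRun : ∀ (ps : List (String × Int)) (x : String × Int),
    PySem.List.max? (x :: ps) (fun pf => pf.2) = some (pvRun x ps) := by
  intro ps
  induction ps with
  | nil => intro x; rfl
  | cons p t ih =>
      intro x
      by_cases h : x.2 < p.2
      · have e : PySem.List.max? (x :: p :: t) (fun pf => pf.2)
            = PySem.List.max? (p :: t) (fun pf => pf.2) := by
          simp [PySem.List.max?, h]
        rw [e, ih p, pvRun_cons, if_pos h]
      · have e : PySem.List.max? (x :: p :: t) (fun pf => pf.2)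
            = PySem.List.max? (x :: t) (fun pf => pf.2) := by
          simp [PySem.List.max?, h]
        rw [e, ih x, pvRun_cons, if_neg h]

-- a non-negative running max never moves on a non-positive pair
lemma pvRun_filter_pos : ∀ (ps : List (String × Int)) (c : String × Int), 0 ≤ c.2 →
    pvRun c ps = pvRun c (ps.filter (fun pf => 0 < pf.2)) := by
  intro ps
  induction ps with
  | nil => intro c _; rfl
  | cons p t ih =>
      intro c hc
      by_cases hp : (0 : Int) < p.2
      · rw [List.filter_cons, if_pos (by simpa using hp), pvRun_cons, pvRun_cons]
        by_cases h : c.2 < p.2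
        · rw [if_pos h]; exact ih p (by omega)
        · rw [if_neg h]; exact ih c hc
      · rw [List.filter_cons, if_neg (by simpa using hp), pvRun_cons,
          if_neg (by omega)]
        exact ih c hc

lemma pvPairs_cons (t : String × String × Int) (ts : List (String × String × Int)) (g : String) :
    pvPairs (t :: ts) g = if t.1 == g then t.2 :: pvPairs ts g else pvPairs ts g := by
  by_cases h : t.1 == g <;> simp [pvPairs, h]

lemma pvPairs_filter_pos (ts : List (String × String × Int)) (g : String) :
    pvPairs (ts.filter (fun t => 0 < t.2.2)) g = (pvPairs ts g).filter (fun pf => 0 < pf.2) := by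
  induction ts with
  | nil => rfl
  | cons t rest ih =>
      by_cases hp : (0 : Int) < t.2.2
      · rw [List.filter_cons, if_pos (by simpa using hp), pvPairs_cons, pvPairs_cons]
        by_cases hg : t.1 == g
        · rw [if_pos hg, if_pos hg, List.filter_cons, if_pos (by simpa using hp), ih]
        · rw [if_neg hg, if_neg hg, ih]
      · rw [List.filter_cons, if_neg (by simpa using hp), pvPairs_cons]
        by_cases hg : t.1 == g
        · rw [if_pos hg, List.filter_cons, if_neg (by simpa using hp), ih]
        · rw [if_neg hg, ih]

lemma pvMain (ts : List (String × String × Int)) :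
    ∀ (gp : PySem.Dict String String) (gf : PySem.Dict String Int),
      (∀ x, gp.contains x = gf.contains x) →
      (∀ x, gf.contains x = true → 0 < gf.getD x 0) →
      (ts.foldl pvStep (gp, gf)).1.items
        = gp.items.map (fun kv => (kv.1, (pvRun (kv.2, gf.getD kv.1 0) (pvPairs ts kv.1)).1))
          ++ (pvNews ts gf.keys).map (fun g => (g, (pvRun ("", 0) (pvPairs ts g)).1)) := by
  induction ts with
  | nil =>
      intro gp gf h1 h2
      simp [pvNews, pvPairs, pvRun]
  | cons t rest ih =>
      intro gp gf h1 h2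
      obtain ⟨g, ph, f⟩ := t
      rw [List.foldl_cons]
      by_cases hc : gf.contains g = true
      · have hpos : 0 < gf.getD g 0 := h2 g hc
        have hkm : g ∈ gf.keys := (PySem.Dict.contains_iff_mem_keys gf g).mp hc
        have hnews : pvNews ((g, ph, f) :: rest) gf.keys = pvNews rest gf.keys := by
          simp [pvNews, hkm]
        have hne : ∀ g' ∈ pvNews rest gf.keys, g' ≠ g := by
          intro g' hg' he
          have hns := pvNews_mem_not_seen rest gf.keys g' hg'
          have : g' ∉ gf.keys := by simpa using hns
          exact this (he ▸ hkm)
        by_cases hlt : gf.getD g 0 < f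
        · -- existing key, new record frequency: both dicts overwritten in place
          have hstep : pvStep (gp, gf) (g, ph, f) = (gp.insert g ph, gf.insert g f) := by
            simp [pvStep, hlt]
          rw [hstep, ih (gp.insert g ph) (gf.insert g f)
            (by intro x; simp [PySem.Dict.contains_insert, h1 x])
            (by
              intro x hx
              rw [PySem.Dict.getD_insert]
              by_cases hxg : x = g
              · rw [if_pos hxg]; omega
              · rw [if_neg hxg]
                rw [PySem.Dict.contains_insert] at hx
                exact h2 x (by simpa [hxg] using hx))]
          rw [PySem.Dict.items_insert_of_contains gp ph (by rw [h1]; exact hc)]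
          rw [PySem.Dict.keys_insert_of_contains _ _ hc, hnews, List.map_map]
          congr 1
          · apply List.map_congr_left
            intro kv hkv
            simp only [Function.comp_apply]
            by_cases hkg : kv.1 = g
            · rw [if_pos (by simpa using hkg)]
              simp only
              rw [PySem.Dict.getD_insert, if_pos rfl, hkg, pvPairs_cons,
                if_pos (by simp), pvRun_cons, if_pos hlt]
            · rw [if_neg (by simpa using hkg)]
              rw [PySem.Dict.getD_insert, if_neg hkg, pvPairs_cons,
                if_neg (by simp [Ne.symm hkg])]
          · apply List.map_congr_left
            intro g' hg'
            rw [pvPairs_cons, if_neg (by simp [Ne.symm (hne g' hg')])]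
        · -- existing key, no new record: state unchanged
          have hstep : pvStep (gp, gf) (g, ph, f) = (gp, gf) := by
            simp [pvStep, hlt]
          rw [hstep, ih gp gf h1 h2, hnews]
          congr 1
          · apply List.map_congr_left
            intro kv hkv
            by_cases hkg : kv.1 = g
            · rw [hkg, pvPairs_cons, if_pos (by simp), pvRun_cons,
                if_neg (by simpa using hlt)]
            · rw [pvPairs_cons, if_neg (by simp [Ne.symm hkg])]
          · apply List.map_congr_left
            intro g' hg'
            rw [pvPairs_cons, if_neg (by simp [Ne.symm (hne g' hg')])]
      · have hc' : gf.contains g = false := by simpa using hc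
        have hgd : gf.getD g 0 = 0 := PySem.Dict.getD_of_not_contains gf 0 hc'
        have hgp : gp.contains g = false := by rw [h1]; exact hc'
        have hkm' : g ∉ gf.keys := by
          intro hm
          have h' := (PySem.Dict.contains_iff_mem_keys gf g).mpr hm
          rw [hc'] at h'
          exact Bool.noConfusion h'
        have hgpmem : ∀ kv ∈ gp.items, kv.1 ≠ g := by
          intro kv hkv he
          have hmem : kv.1 ∈ gp.keys := List.mem_map_of_mem hkv
          have h' := (PySem.Dict.contains_iff_mem_keys gp g).mpr (he ▸ hmem)
          rw [hgp] at h'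
          exact Bool.noConfusion h'
        by_cases hf : (0 : Int) < f
        · -- fresh key with positive frequency: appended to both dicts
          have hstep : pvStep (gp, gf) (g, ph, f) = (gp.insert g ph, gf.insert g f) := by
            simp [pvStep, hgd, hf]
          rw [hstep, ih (gp.insert g ph) (gf.insert g f)
            (by intro x; simp [PySem.Dict.contains_insert, h1 x])
            (by
              intro x hx
              rw [PySem.Dict.getD_insert]
              by_cases hxg : x = g
              · rw [if_pos hxg]; exact hf
              · rw [if_neg hxg]
                rw [PySem.Dict.contains_insert] at hx
                exact h2 x (by simpa [hxg] using hx))]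
          rw [PySem.Dict.items_insert_of_not_contains gp ph hgp]
          rw [PySem.Dict.keys_insert_of_not_contains _ _ hc']
          have hnews2 : pvNews rest (gf.keys ++ [g]) = pvNews rest (g :: gf.keys) := by
            apply pvNews_congr
            intro x
            simp [Bool.or_comm]
          have hnews1 : pvNews ((g, ph, f) :: rest) gf.keys = g :: pvNews rest (g :: gf.keys) := by
            simp [pvNews, hf, hkm']
          rw [hnews1, hnews2]
          simp only [List.map_append, List.map_cons, List.map_nil, List.append_assoc,
            List.nil_append, List.cons_append]
          congr 1
          · apply List.map_congr_left
            intro kv hkv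
            have hkg := hgpmem kv hkv
            rw [PySem.Dict.getD_insert, if_neg hkg, pvPairs_cons,
              if_neg (by simp [Ne.symm hkg])]
          · congr 1
            · rw [PySem.Dict.getD_insert, if_pos rfl, pvPairs_cons, if_pos (by simp),
                pvRun_cons, if_pos (by simpa using hf)]
            · apply List.map_congr_left
              intro g' hg'
              have hns := pvNews_mem_not_seen rest (g :: gf.keys) g' hg'
              have hne : g' ≠ g := by
                simp only [List.contains_cons, Bool.or_eq_false_iff] at hns
                simpa using hns.1
              rw [pvPairs_cons, if_neg (by simp [Ne.symm hne])]
        · -- fresh key with non-positive frequency: ignored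
          have hstep : pvStep (gp, gf) (g, ph, f) = (gp, gf) := by
            simp [pvStep, hgd, hf]
          have hnews : pvNews ((g, ph, f) :: rest) gf.keys = pvNews rest gf.keys := by
            simp [pvNews, hf]
          rw [hstep, ih gp gf h1 h2, hnews]
          congr 1
          · apply List.map_congr_left
            intro kv hkv
            have hkg := hgpmem kv hkv
            rw [pvPairs_cons, if_neg (by simp [Ne.symm hkg])]
          · apply List.map_congr_left
            intro g' hg'
            by_cases he : g' = g
            · rw [he, pvPairs_cons, if_pos (by simp), pvRun_cons,
                if_neg (by simpa using hf)]
            · rw [pvPairs_cons, if_neg (by simp [Ne.symm he])]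

-- ===== VERDICT (by name: the statement is the Claim_ definition above) =====
theorem get_g2p_without_accent_spec : Claim_equal_get_g2p_without_accent := by
  intro vocab _
  unfold Spec_get_g2p_without_accent get_g2p_without_accent get_g2p_without_accent_alt
  dsimp only
  set ts := vocab.flatMap (fun p => p.2.map (fun q => (PySem.Str.replace p.1 "+" "", q))) with hts
  -- A's nested loop is the single fold of pvStep over the flattened triples
  have hA : (vocab.foldl
      (fun (st : PySem.Dict String String × PySem.Dict String Int) p =>
        p.2.foldl
          (fun st q =>
            if st.2.getD (PySem.Str.replace p.1 "+" "") 0 < q.2 then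
              (st.1.insert (PySem.Str.replace p.1 "+" "") q.1,
               st.2.insert (PySem.Str.replace p.1 "+" "") q.2)
            else st)
          st)
      (PySem.Dict.empty, PySem.Dict.empty))
      = ts.foldl pvStep (PySem.Dict.empty, PySem.Dict.empty) := by
    rw [hts, List.foldl_flatMap]
    simp only [List.foldl_map, pvStep]
  -- B's nested guarded loop is the modify-append fold over the POSITIVE triples
  have hB : (vocab.foldl
      (fun (d : PySem.Dict String (List (String × Int))) p =>
        p.2.foldl
          (fun d q => if 0 < q.2 then d.modify (PySem.Str.replace p.1 "+" "") [] (· ++ [q]) else d)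
          d)
      PySem.Dict.empty)
      = (ts.filter (fun t => 0 < t.2.2)).foldl
          (fun (d : PySem.Dict String (List (String × Int))) t => d.modify t.1 [] (· ++ [t.2]))
          PySem.Dict.empty := by
    rw [List.foldl_filter, hts, List.foldl_flatMap]
    simp only [List.foldl_map, decide_eq_true_eq]
  rw [hA, hB, pvMain _ PySem.Dict.empty PySem.Dict.empty
    (by intro x; rfl)
    (by intro x hx; exact Bool.noConfusion hx)]
  have hkeys : (PySem.Dict.empty : PySem.Dict String Int).keys = ([] : List String) := rfl
  have hitems : (PySem.Dict.empty : PySem.Dict String String).items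
      = ([] : List (String × String)) := rfl
  rw [hkeys, hitems]
  simp only [List.map_nil, List.nil_append]
  -- B: characterise the grouping dict and the final comprehension
  set tsP := ts.filter (fun t => 0 < t.2.2) with htsP
  set observed := tsP.foldl
      (fun (d : PySem.Dict String (List (String × Int))) t => d.modify t.1 [] (· ++ [t.2]))
      PySem.Dict.empty with hobs
  have hOkeys : observed.keys = pvNews ts [] := by
    rw [hobs, PySem.Dict.keys_foldl_modify_key tsP (fun t => t.1)]
    have h := foldl_add_eq_pvNews ts []
    simpa [PySem.Set.update, PySem.Dict.keys_empty, htsP] using h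
  have hnodup : observed.keys.Nodup := by
    rw [hobs]
    exact PySem.Dict.nodup_keys_foldl_modify_key tsP (fun t => t.1) [] (fun _ t => (· ++ [t.2]))
      PySem.Dict.empty (by simp [PySem.Dict.keys_empty])
  have hOget : ∀ g, observed.getD g [] = pvPairs tsP g := by
    intro g
    rw [hobs, PySem.Dict.getD_foldl_modify_append]
    simp [pvPairs]
  have hOitems : observed.items = (pvNews ts []).map (fun g => (g, pvPairs tsP g)) := by
    rw [PySem.Dict.items_eq_map_keys observed hnodup []]
    rw [hOkeys]
    apply List.map_congr_left
    intro g _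
    rw [hOget]
  have hfresh := PySem.Dict.items_foldl_insert_fresh observed.items (fun kv => kv.1)
    (fun kv => ((PySem.List.max? kv.2 (fun pf => pf.2)).map (fun pf => pf.1)).getD "")
    (PySem.Dict.empty : PySem.Dict String String)
    (by intro a _; rfl)
    (by
      have : observed.items.map (fun kv => kv.1) = observed.keys := rfl
      rw [this]; exact hnodup)
  rw [hfresh]
  have hempty : (PySem.Dict.empty : PySem.Dict String String).items
      = ([] : List (String × String)) := rfl
  rw [hempty, List.nil_append, hOitems, List.map_map]
  apply List.map_congr_left
  intro g hg
  simp only [Function.comp_apply]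
  -- the per-grapheme value: running max seeded 0 = max over the positive pairs
  obtain ⟨t, htmem, ht1, ht2⟩ := pvNews_mem_pos ts [] g hg
  have hmemP : t.2 ∈ pvPairs tsP g := by
    simp only [pvPairs, List.mem_map, htsP]
    exact ⟨t, List.mem_filter.mpr ⟨List.mem_filter.mpr ⟨htmem, by simpa using ht2⟩,
      by simp [ht1]⟩, rfl⟩
  obtain ⟨x, rest, hpp⟩ : ∃ x rest, pvPairs tsP g = x :: rest := by
    cases h : pvPairs tsP g with
    | nil => rw [h] at hmemP; simp at hmemP
    | cons x rest => exact ⟨x, rest, rfl⟩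
  have hxpos : 0 < x.2 := by
    have hx : x ∈ pvPairs tsP g := by rw [hpp]; exact List.mem_cons_self
    rw [htsP, pvPairs_filter_pos] at hx
    have := List.mem_filter.mp hx
    simpa using this.2
  rw [hpp, max?_eq_pvRun]
  have hrun : pvRun ("", 0) (pvPairs ts g) = pvRun x rest := by
    rw [pvRun_filter_pos (pvPairs ts g) ("", 0) (by simp)]
    rw [← pvPairs_filter_pos, ← htsP, hpp, pvRun_cons, if_pos (by simpa using hxpos)]
  rw [hrun]
  rfl
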